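-- pv_equiv track=rewrite | github.com/gigo-gigo/atcoder | abc/abc430/c.py | solve
-- ===== SOURCE A (Python) =====
-- from bisect import bisect_left
-- from itertools import accumulate
--
-- def solve(N, A, B, S):
--     X = [int(s == "a") for s in S]
--     Y = [int(s != "a") for s in S]
--     accX = list(accumulate(X, initial=0))
--     accY = list(accumulate(Y, initial=0))
--
--     ans = 0
--     for left in range(N):
--         i = bisect_left(accX, accX[left] + A)
--         j = bisect_left(accY, accY[left] + B)
--         ans += max(0, j - i)
--
--     return ans
-- ===== SOURCE B (Python) =====
-- def solve(N, A, B, S):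
--     n = len(S)
--     accX = [0]
--     accY = [0]
--     for c in S:
--         accX.append(accX[-1] + (c == "a"))
--         accY.append(accY[-1] + (c != "a"))
--     ans = 0
--     i = 0
--     j = 0
--     for left in range(N):
--         tx = accX[left] + A
--         ty = accY[left] + B
--         while i <= n and accX[i] < tx:
--             i += 1
--         while j <= n and accY[j] < ty:
--             j += 1
--         ans += max(0, j - i)
--     return ans
-- ===== Notes on version B (the rewrite author's own statement) =====
-- stated objective: faster
-- what changed: Per-left bisect_left binary searches over the prefix arrays are replaced by two monotone pointers that advance once across each array over the whole loop.
import Mathlib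
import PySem

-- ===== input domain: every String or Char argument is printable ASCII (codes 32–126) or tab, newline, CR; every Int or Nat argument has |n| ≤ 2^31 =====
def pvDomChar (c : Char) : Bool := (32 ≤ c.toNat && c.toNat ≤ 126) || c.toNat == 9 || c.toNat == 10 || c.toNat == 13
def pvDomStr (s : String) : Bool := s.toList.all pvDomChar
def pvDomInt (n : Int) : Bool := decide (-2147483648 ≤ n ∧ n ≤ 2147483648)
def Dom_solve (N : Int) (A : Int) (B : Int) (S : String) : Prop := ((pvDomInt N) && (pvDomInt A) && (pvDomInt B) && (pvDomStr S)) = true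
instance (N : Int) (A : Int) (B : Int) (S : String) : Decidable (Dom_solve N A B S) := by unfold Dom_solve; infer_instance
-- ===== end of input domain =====

-- B replaces the per-left binary searches by two monotone pointers over the prefix arrays (O(N) vs O(N log N)).

-- ===== PORT A =====
-- accumulate(X, initial=0) produces 0 followed by the running sums; accFrom gives the running sums.
def accFrom (init : Int) : List Int → List Int
  | [] => []
  | x :: xs => (init + x) :: accFrom (init + x) xs

-- bisect_left's binary-search loop (lo, hi), step for step.
def bisectGo (a : List Int) (x : Int) (lo hi : Nat) : Nat :=
  if h : lo < hi then
    let mid := (lo + hi) / 2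
    if a.getD mid 0 < x then bisectGo a x (mid + 1) hi else bisectGo a x lo mid
  else lo
termination_by hi - lo
decreasing_by
  · omega
  · omega

def bisectLeft (a : List Int) (x : Int) : Nat := bisectGo a x 0 a.length

def solve (N : Int) (A : Int) (B : Int) (S : String) : Int :=
  let X := S.toList.map (fun c => if c = 'a' then (1 : Int) else 0)
  let Y := S.toList.map (fun c => if c ≠ 'a' then (1 : Int) else 0)
  let accX := 0 :: accFrom 0 X
  let accY := 0 :: accFrom 0 Y
  (List.range N.toNat).foldl (fun ans left =>
    let i := bisectLeft accX (accX.getD left 0 + A)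
    let j := bisectLeft accY (accY.getD left 0 + B)
    ans + max 0 ((j : Int) - (i : Int))) 0

-- ===== PORT B =====
-- Source B's single pass building both prefix arrays.
def accPair : List Char → Int → Int → List Int × List Int
  | [], _, _ => ([], [])
  | c :: cs, cx, cy =>
    let cx' := cx + (if c = 'a' then (1 : Int) else 0)
    let cy' := cy + (if c ≠ 'a' then (1 : Int) else 0)
    let r := accPair cs cx' cy'
    (cx' :: r.1, cy' :: r.2)

-- Source B's 'while i <= n and acc[i] < t: i += 1' (list length is n+1, so i ≤ n ↔ i < length).
def advance (a : List Int) (t : Int) (i : Nat) : Nat :=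
  if i < a.length then
    (if a.getD i 0 < t then advance a t (i + 1) else i)
  else i
termination_by a.length - i
decreasing_by omega

def solve_alt (N : Int) (A : Int) (B : Int) (S : String) : Int :=
  let p := accPair S.toList 0 0
  let accX := 0 :: p.1
  let accY := 0 :: p.2
  let r := (List.range N.toNat).foldl (fun (st : Nat × Nat × Int) left =>
    let tx := accX.getD left 0 + A
    let ty := accY.getD left 0 + B
    let i := advance accX tx st.1
    let j := advance accY ty st.2.1
    (i, j, st.2.2 + max 0 ((j : Int) - (i : Int)))) (0, 0, 0)
  r.2.2

-- ===== PRECONDITION & SPEC =====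
-- Pre_ excludes only inputs where A raises IndexError: left = N-1 must index accX (length len(S)+1).
def Pre_solve (N : Int) (A : Int) (B : Int) (S : String) : Prop :=
  N ≤ (S.toList.length : Int) + 1
instance (N : Int) (A : Int) (B : Int) (S : String) : Decidable (Pre_solve N A B S) := by
  unfold Pre_solve; infer_instance

def pvWitness_solve : Int × Int × Int × String := (3, 1, 1, "aab")

def Spec_solve (N : Int) (A : Int) (B : Int) (S : String) (out : Int) : Prop := out = solve_alt N A B S
instance (N : Int) (A : Int) (B : Int) (S : String) (out : Int) : Decidable (Spec_solve N A B S out) := by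
  unfold Spec_solve; infer_instance

-- ===== CLAIM (what is proved, stated in full; the proofs are below) =====
def Claim_equal_solve : Prop := ∀ (N : Int) (A : Int) (B : Int) (S : String), Dom_solve N A B S → Pre_solve N A B S → Spec_solve N A B S (solve N A B S)

-- ===== LEMMAS AND PROOFS =====

-- number of elements of a below x: for a sorted list this is bisect_left's result
def cnt (a : List Int) (x : Int) : Nat := a.countP (fun v => decide (v < x))

theorem cnt_le_length (a : List Int) (x : Int) : cnt a x ≤ a.length :=
  List.countP_le_length

theorem cnt_mono (a : List Int) {x x' : Int} (h : x ≤ x') : cnt a x ≤ cnt a x' := by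
  apply List.countP_mono_left
  intro v _ hv
  simp only [decide_eq_true_eq] at *
  omega

-- prefix characterisation of cnt on a sorted list
theorem cnt_char (a : List Int) (x : Int) (ha : a.Pairwise (· ≤ ·)) :
    ∀ k, k < a.length → (a.getD k 0 < x ↔ k < cnt a x) := by
  induction a with
  | nil => intro k hk; simp at hk
  | cons h t ih =>
    rcases List.pairwise_cons.mp ha with ⟨hht, hts⟩
    have hz : ¬ h < x → cnt t x = 0 := by
      intro hhx
      refine List.countP_eq_zero.mpr ?_
      intro y hy
      have := hht y hy
      simp only [decide_eq_true_eq]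
      omega
    intro k hk
    cases k with
    | zero =>
      simp only [List.getD, List.getElem?_cons_zero, Option.getD_some, cnt, List.countP_cons]
      by_cases hhx : h < x
      · simp [hhx]
      · simp [hhx, hz hhx, cnt] at *
        omega
    | succ k =>
      have hk' : k < t.length := by simpa using hk
      have := ih hts k hk'
      simp only [cnt, List.countP_cons] at *
      by_cases hhx : h < x
      · simp only [List.getD, List.getElem?_cons_succ] at *
        simp [hhx]
        omega
      · have h0 : cnt t x = 0 := hz hhx
        simp only [cnt] at h0
        have hmem : t.getD k 0 ∈ t := by
          rw [List.getD_eq_getElem t 0 hk']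
          exact List.getElem_mem hk'
        have := hht _ hmem
        simp only [List.getD, List.getElem?_cons_succ, hhx] at *
        simp [h0]
        omega

theorem getD_mono (a : List Int) (ha : a.Pairwise (· ≤ ·)) {k k' : Nat}
    (hkk : k ≤ k') (hk' : k' < a.length) : a.getD k 0 ≤ a.getD k' 0 := by
  rcases Nat.lt_or_ge k k' with hlt | hge
  · have hk : k < a.length := lt_trans hlt hk'
    rw [List.getD_eq_getElem a 0 hk, List.getD_eq_getElem a 0 hk']
    exact List.pairwise_iff_getElem.mp ha k k' hk hk' hlt
  · have : k = k' := le_antisymm hkk hge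
    subst this; exact le_refl _

theorem advance_eq (a : List Int) (t : Int) (ha : a.Pairwise (· ≤ ·)) :
    ∀ i, i ≤ cnt a t → advance a t i = cnt a t := by
  have H : ∀ m i, a.length - i ≤ m → i ≤ cnt a t → advance a t i = cnt a t := by
    intro m
    induction m with
    | zero =>
      intro i hm hi
      have hlen : a.length ≤ i := by omega
      rw [advance]
      have := cnt_le_length a t
      simp only [if_neg (by omega : ¬ i < a.length)]
      omega
    | succ m ihm =>
      intro i hm hi
      rw [advance]
      by_cases hil : i < a.length
      · simp only [if_pos hil]
        by_cases hlt : a.getD i 0 < t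
        · have : i < cnt a t := (cnt_char a t ha i hil).mp hlt
          simp only [if_pos hlt]
          exact ihm (i + 1) (by omega) (by omega)
        · have : ¬ i < cnt a t := fun hc => hlt ((cnt_char a t ha i hil).mpr hc)
          simp only [if_neg hlt]
          omega
      · simp only [if_neg hil]
        have := cnt_le_length a t
        omega
  intro i hi
  exact H (a.length - i) i (le_refl _) hi

theorem bisect_eq (a : List Int) (x : Int) (ha : a.Pairwise (· ≤ ·)) :
    ∀ m lo hi, hi - lo ≤ m → lo ≤ cnt a x → cnt a x ≤ hi → hi ≤ a.length →
      bisectGo a x lo hi = cnt a x := by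
  intro m
  induction m with
  | zero =>
    intro lo hi hm hlo hhi hlen
    rw [bisectGo]
    simp only [dif_neg (by omega : ¬ lo < hi)]
    omega
  | succ m ihm =>
    intro lo hi hm hlo hhi hlen
    rw [bisectGo]
    by_cases hlh : lo < hi
    · simp only [dif_pos hlh]
      have hmid₁ : lo ≤ (lo + hi) / 2 := by omega
      have hmid₂ : (lo + hi) / 2 < hi := by omega
      have hmlen : (lo + hi) / 2 < a.length := by omega
      by_cases hlt : a.getD ((lo + hi) / 2) 0 < x
      · have : (lo + hi) / 2 < cnt a x := (cnt_char a x ha _ hmlen).mp hlt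
        simp only [if_pos hlt]
        exact ihm ((lo + hi) / 2 + 1) hi (by omega) (by omega) hhi hlen
      · have : ¬ (lo + hi) / 2 < cnt a x := fun hc => hlt ((cnt_char a x ha _ hmlen).mpr hc)
        simp only [if_neg hlt]
        exact ihm lo ((lo + hi) / 2) (by omega) hlo (by omega) (by omega)
    · simp only [dif_neg hlh]
      omega

theorem bisectLeft_eq (a : List Int) (x : Int) (ha : a.Pairwise (· ≤ ·)) :
    bisectLeft a x = cnt a x :=
  bisect_eq a x ha a.length 0 a.length (by omega) (Nat.zero_le _) (cnt_le_length a x) (le_refl _)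

theorem accFrom_length (init : Int) (xs : List Int) : (accFrom init xs).length = xs.length := by
  induction xs generalizing init with
  | nil => simp [accFrom]
  | cons x xs ih => simp [accFrom, ih]

theorem accFrom_le (init : Int) (xs : List Int) (h : ∀ x ∈ xs, 0 ≤ x) :
    ∀ y ∈ accFrom init xs, init ≤ y := by
  induction xs generalizing init with
  | nil => simp [accFrom]
  | cons x xs ih =>
    intro y hy
    have hx := h x (List.mem_cons_self)
    simp only [accFrom, List.mem_cons] at hy
    rcases hy with rfl | hy
    · omega
    · have := ih (init + x) (fun z hz => h z (List.mem_cons_of_mem x hz)) y hy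
      omega

theorem accFrom_pairwise (init : Int) (xs : List Int) (h : ∀ x ∈ xs, 0 ≤ x) :
    (init :: accFrom init xs).Pairwise (· ≤ ·) := by
  induction xs generalizing init with
  | nil => simp [accFrom]
  | cons x xs ih =>
    have hx := h x (List.mem_cons_self)
    have htail := ih (init + x) (fun z hz => h z (List.mem_cons_of_mem x hz))
    refine List.pairwise_cons.mpr ⟨?_, by simpa [accFrom] using htail⟩
    intro y hy
    simp only [accFrom, List.mem_cons] at hy
    rcases hy with rfl | hy
    · omega
    · have := accFrom_le (init + x) xs (fun z hz => h z (List.mem_cons_of_mem x hz)) y hy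
      omega

theorem accPair_eq (cs : List Char) (cx cy : Int) :
    accPair cs cx cy = (accFrom cx (cs.map (fun c => if c = 'a' then (1 : Int) else 0)),
                        accFrom cy (cs.map (fun c => if c ≠ 'a' then (1 : Int) else 0))) := by
  induction cs generalizing cx cy with
  | nil => simp [accPair, accFrom]
  | cons c cs ih => simp [accPair, accFrom, ih]

-- the two loops agree, given sorted prefix arrays and pointers below the next targets' counts
theorem loop_eq (aX aY : List Int) (A B : Int)
    (hx : aX.Pairwise (· ≤ ·)) (hy : aY.Pairwise (· ≤ ·)) :
    ∀ (ls : List Nat), ls.Pairwise (· ≤ ·) →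
      (∀ k ∈ ls, k < aX.length) → (∀ k ∈ ls, k < aY.length) →
      ∀ (i j : Nat) (ans : Int),
        (∀ k ∈ ls, i ≤ cnt aX (aX.getD k 0 + A)) →
        (∀ k ∈ ls, j ≤ cnt aY (aY.getD k 0 + B)) →
        (ls.foldl (fun (st : Nat × Nat × Int) left =>
          let tx := aX.getD left 0 + A
          let ty := aY.getD left 0 + B
          let i := advance aX tx st.1
          let j := advance aY ty st.2.1
          (i, j, st.2.2 + max 0 ((j : Int) - (i : Int)))) (i, j, ans)).2.2
        = ls.foldl (fun ans left =>
          let i := bisectLeft aX (aX.getD left 0 + A)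
          let j := bisectLeft aY (aY.getD left 0 + B)
          ans + max 0 ((j : Int) - (i : Int))) ans := by
  intro ls
  induction ls with
  | nil => intro _ _ _ i j ans _ _; simp
  | cons k ls ih =>
    intro hpw hbX hbY i j ans hiC hjC
    rcases List.pairwise_cons.mp hpw with ⟨hkls, hpw'⟩
    have hkX : k < aX.length := hbX k (List.mem_cons_self)
    have hkY : k < aY.length := hbY k (List.mem_cons_self)
    have hiadv : advance aX (aX.getD k 0 + A) i = cnt aX (aX.getD k 0 + A) :=
      advance_eq aX _ hx i (hiC k (List.mem_cons_self))
    have hjadv : advance aY (aY.getD k 0 + B) j = cnt aY (aY.getD k 0 + B) :=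
      advance_eq aY _ hy j (hjC k (List.mem_cons_self))
    have hbA : bisectLeft aX (aX.getD k 0 + A) = cnt aX (aX.getD k 0 + A) :=
      bisectLeft_eq aX _ hx
    have hbB : bisectLeft aY (aY.getD k 0 + B) = cnt aY (aY.getD k 0 + B) :=
      bisectLeft_eq aY _ hy
    simp only [List.foldl_cons]
    rw [ih hpw' (fun k' hk' => hbX k' (List.mem_cons_of_mem k hk'))
          (fun k' hk' => hbY k' (List.mem_cons_of_mem k hk'))]
    · simp only [hiadv, hjadv, hbA, hbB]
    · intro k' hk'
      simp only [hiadv]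
      exact le_trans (cnt_mono aX (by
        have := getD_mono aX hx (hkls k' hk') (hbX k' (List.mem_cons_of_mem k hk'))
        omega)) (le_refl _)
    · intro k' hk'
      simp only [hjadv]
      exact le_trans (cnt_mono aY (by
        have := getD_mono aY hy (hkls k' hk') (hbY k' (List.mem_cons_of_mem k hk'))
        omega)) (le_refl _)

-- ===== VERDICT (by name: the statement is the Claim_ definition above) =====
theorem solve_spec : Claim_equal_solve := by
  intro N A B S _ hpre
  unfold Spec_solve solve solve_alt Pre_solve at *
  simp only [accPair_eq]
  set X := S.toList.map (fun c => if c = 'a' then (1 : Int) else 0) with hX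
  set Y := S.toList.map (fun c => if c ≠ 'a' then (1 : Int) else 0) with hY
  have hXn : ∀ x ∈ X, (0 : Int) ≤ x := by
    intro x hx; rw [hX] at hx
    rcases List.mem_map.mp hx with ⟨c, _, rfl⟩
    split <;> omega
  have hYn : ∀ x ∈ Y, (0 : Int) ≤ x := by
    intro x hx; rw [hY] at hx
    rcases List.mem_map.mp hx with ⟨c, _, rfl⟩
    split <;> omega
  have hpx := accFrom_pairwise 0 X hXn
  have hpy := accFrom_pairwise 0 Y hYn
  have hlenX : (0 :: accFrom 0 X).length = S.toList.length + 1 := by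
    simp [accFrom_length, hX]
  have hlenY : (0 :: accFrom 0 Y).length = S.toList.length + 1 := by
    simp [accFrom_length, hY]
  have hbound : ∀ k ∈ List.range N.toNat, k < S.toList.length + 1 := by
    intro k hk
    have := List.mem_range.mp hk
    omega
  rw [loop_eq (0 :: accFrom 0 X) (0 :: accFrom 0 Y) A B hpx hpy
        (List.range N.toNat) (List.pairwise_lt_range.imp le_of_lt)
        (fun k hk => by rw [hlenX]; exact hbound k hk)
        (fun k hk => by rw [hlenY]; exact hbound k hk)
        0 0 0 (fun k _ => Nat.zero_le _) (fun k _ => Nat.zero_le _)]
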